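-- pv_equiv track=rewrite | github.com/liupengsay/PyIsTheBestLang | algorithm/src/dp/matrix_dp.py | path_mul_mod
-- ===== SOURCE A (Python) =====
-- def path_mul_mod(m, n, k, grid):
--     # 求矩阵左上角到右下角的乘积取模数
--     dp = [[set() for _ in range(n)] for _ in range(m)]
--     dp[0][0].add(grid[0][0] % k)
--     for i in range(1, m):
--         x = grid[i][0]
--         for p in dp[i - 1][0]:
--             dp[i][0].add((p * x) % k)
--     for j in range(1, n):
--         x = grid[0][j]
--         for p in dp[0][j - 1]:
--             dp[0][j].add((p * x) % k)
--
--     for i in range(1, m):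
--         for j in range(1, n):
--             x = grid[i][j]
--             for p in dp[i][j - 1]:
--                 dp[i][j].add((p * x) % k)
--             for p in dp[i - 1][j]:
--                 dp[i][j].add((p * x) % k)
--     ans = sorted(list(dp[-1][-1]))
--     return ans
-- ===== SOURCE B (Python) =====
-- def path_mul_mod(m, n, k, grid):
--     # Top-down memoized recursion over reachable residue sets (same values as A).
--     memo = {}
--
--     def reach(i, j):
--         if (i, j) in memo:
--             return memo[i, j]
--         x = grid[i][j]
--         res = set()
--         if i == 0 and j == 0:
--             res.add(x % k)
--         if j:
--             for p in reach(i, j - 1):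
--                 res.add((p * x) % k)
--         if i:
--             for p in reach(i - 1, j):
--                 res.add((p * x) % k)
--         memo[i, j] = res
--         return res
--
--     return sorted(reach(m - 1, n - 1))
-- ===== Notes on version B (the rewrite author's own statement) =====
-- stated objective: alternative
-- what changed: Replaced A's three explicit bottom-up loop nests over a full m-by-n table of sets by a single top-down memoized recursion reach(i,j) that unions the predecessor residue sets on demand.
import Mathlib
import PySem

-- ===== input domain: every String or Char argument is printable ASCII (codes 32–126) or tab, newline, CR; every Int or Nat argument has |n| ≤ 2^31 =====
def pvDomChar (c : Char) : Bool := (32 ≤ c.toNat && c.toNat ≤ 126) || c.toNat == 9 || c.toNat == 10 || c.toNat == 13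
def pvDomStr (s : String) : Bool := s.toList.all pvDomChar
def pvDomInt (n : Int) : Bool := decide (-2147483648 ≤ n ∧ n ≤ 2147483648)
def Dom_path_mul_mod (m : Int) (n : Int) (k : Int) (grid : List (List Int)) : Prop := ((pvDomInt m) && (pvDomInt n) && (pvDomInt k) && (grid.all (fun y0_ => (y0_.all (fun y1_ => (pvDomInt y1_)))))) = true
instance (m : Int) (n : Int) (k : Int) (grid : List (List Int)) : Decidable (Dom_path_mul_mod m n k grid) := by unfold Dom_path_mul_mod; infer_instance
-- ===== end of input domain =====

-- B replaces A's three bottom-up loop nests over a full 2D table by a top-down memoized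
-- recursion over cells; same values, same asymptotic cost (objective: alternative).

-- shared helpers (both Pythons read grid[i][j] and run 'for p in S: res.add((p*x) % k)')
def gridAt (grid : List (List Int)) (i j : Nat) : Int := (grid.getD i []).getD j 0

def addModMul (k x : Int) (dst src : PySem.Set Int) : PySem.Set Int :=
  src.foldl (fun t p => PySem.Set.add t (PySem.Int.mod (p * x) k)) dst

-- ===== PORT A =====
-- the Python 2D list of sets 'dp' is represented as a function table with pointwise update
def upd2 (t : Nat → Nat → PySem.Set Int) (i j : Nat) (s : PySem.Set Int) :
    Nat → Nat → PySem.Set Int :=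
  fun a b => if a = i ∧ b = j then s else t a b

def path_mul_mod (m : Int) (n : Int) (k : Int) (grid : List (List Int)) : List Int :=
  let dp0 : Nat → Nat → PySem.Set Int := fun _ _ => PySem.Set.empty
  let dp1 := upd2 dp0 0 0 (PySem.Set.add (dp0 0 0) (PySem.Int.mod (gridAt grid 0 0) k))
  let dp2 := (PySem.List.pyRange 1 m).foldl (fun dp i =>
      upd2 dp i.toNat 0
        (addModMul k (gridAt grid i.toNat 0) (dp i.toNat 0) (dp (i.toNat - 1) 0))) dp1
  let dp3 := (PySem.List.pyRange 1 n).foldl (fun dp j =>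
      upd2 dp 0 j.toNat
        (addModMul k (gridAt grid 0 j.toNat) (dp 0 j.toNat) (dp 0 (j.toNat - 1)))) dp2
  let dp4 := (PySem.List.pyRange 1 m).foldl (fun dp i =>
      (PySem.List.pyRange 1 n).foldl (fun dp j =>
        let x := gridAt grid i.toNat j.toNat
        upd2 dp i.toNat j.toNat
          (addModMul k x (addModMul k x (dp i.toNat j.toNat) (dp i.toNat (j.toNat - 1)))
            (dp (i.toNat - 1) j.toNat))) dp) dp3
  PySem.List.sorted (dp4 (m - 1).toNat (n - 1).toNat) (fun v => v) false

-- ===== PORT B =====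
-- top-down memoized recursion: reach(i, j) with the memo dict threaded through
def reachMemo (grid : List (List Int)) (k : Int) (i j : Nat)
    (memo : PySem.Dict (Nat × Nat) (PySem.Set Int)) :
    PySem.Set Int × PySem.Dict (Nat × Nat) (PySem.Set Int) :=
  match memo.get? (i, j) with
  | some s => (s, memo)
  | none =>
    let x := gridAt grid i j
    let res0 : PySem.Set Int :=
      if i = 0 ∧ j = 0 then PySem.Set.add PySem.Set.empty (PySem.Int.mod x k)
      else PySem.Set.empty
    let pr1 :=
      if j ≠ 0 then
        let r := reachMemo grid k i (j - 1) memo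
        (addModMul k x res0 r.1, r.2)
      else (res0, memo)
    let pr2 :=
      if i ≠ 0 then
        let r := reachMemo grid k (i - 1) j pr1.2
        (addModMul k x pr1.1 r.1, r.2)
      else pr1
    (pr2.1, PySem.Dict.insert pr2.2 (i, j) pr2.1)
termination_by (i + j)
decreasing_by all_goals omega

def path_mul_mod_alt (m : Int) (n : Int) (k : Int) (grid : List (List Int)) : List Int :=
  PySem.List.sorted
    (reachMemo grid k (m - 1).toNat (n - 1).toNat PySem.Dict.empty).1 (fun v => v) false

-- ===== PRECONDITION & SPEC =====
-- Pre_ is exactly where Python A returns: m,n ≥ 1 and k ≠ 0 (else IndexError on dp[-1][-1] /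
-- dp[0][0] or ZeroDivisionError), grid has at least m rows and each of the first m rows has
-- at least n entries (else IndexError on grid[i][j]).
def Pre_path_mul_mod (m : Int) (n : Int) (k : Int) (grid : List (List Int)) : Prop :=
  1 ≤ m ∧ 1 ≤ n ∧ k ≠ 0 ∧ m ≤ (grid.length : Int) ∧
    ∀ row ∈ grid.take m.toNat, n ≤ (row.length : Int)
instance (m : Int) (n : Int) (k : Int) (grid : List (List Int)) : Decidable (Pre_path_mul_mod m n k grid) := by unfold Pre_path_mul_mod; infer_instance

def pvWitness_path_mul_mod : Int × Int × Int × List (List Int) :=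
  (2, 3, 5, [[2, 3, 4], [1, 6, 2]])

def Spec_path_mul_mod (m : Int) (n : Int) (k : Int) (grid : List (List Int)) (out : List Int) : Prop := out = path_mul_mod_alt m n k grid
instance (m : Int) (n : Int) (k : Int) (grid : List (List Int)) (out : List Int) : Decidable (Spec_path_mul_mod m n k grid out) := by unfold Spec_path_mul_mod; infer_instance

-- ===== CLAIM (what is proved, stated in full; the proofs are below) =====
def Claim_equal_path_mul_mod : Prop := ∀ (m : Int) (n : Int) (k : Int) (grid : List (List Int)), Dom_path_mul_mod m n k grid → Pre_path_mul_mod m n k grid → Spec_path_mul_mod m n k grid (path_mul_mod m n k grid)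

-- ===== LEMMAS AND PROOFS =====

-- the common memo-free value of cell (i, j): what both programs store there
def reachP (grid : List (List Int)) (k : Int) : Nat → Nat → PySem.Set Int
  | i, j =>
    let x := gridAt grid i j
    let r0 : PySem.Set Int :=
      if i = 0 ∧ j = 0 then PySem.Set.add PySem.Set.empty (PySem.Int.mod x k)
      else PySem.Set.empty
    let r1 := if j ≠ 0 then addModMul k x r0 (reachP grid k i (j - 1)) else r0
    if i ≠ 0 then addModMul k x r1 (reachP grid k (i - 1) j) else r1
termination_by i j => i + j
decreasing_by all_goals omega

def GoodMemo (grid : List (List Int)) (k : Int)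
    (memo : PySem.Dict (Nat × Nat) (PySem.Set Int)) : Prop :=
  ∀ a b s, memo.get? (a, b) = some s → s = reachP grid k a b

-- local facts about reachP's branches
theorem reachP_pos_zero (grid : List (List Int)) (k : Int) (i : Nat) (hi : i ≠ 0) :
    reachP grid k i 0 =
      addModMul k (gridAt grid i 0) PySem.Set.empty (reachP grid k (i - 1) 0) := by
  rw [reachP]; simp [hi]

theorem reachP_zero_pos (grid : List (List Int)) (k : Int) (j : Nat) (hj : j ≠ 0) :
    reachP grid k 0 j =
      addModMul k (gridAt grid 0 j) PySem.Set.empty (reachP grid k 0 (j - 1)) := by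
  rw [reachP]; simp [hj]

theorem reachP_pos_pos (grid : List (List Int)) (k : Int) (i j : Nat) (hi : i ≠ 0) (hj : j ≠ 0) :
    reachP grid k i j =
      addModMul k (gridAt grid i j)
        (addModMul k (gridAt grid i j) PySem.Set.empty (reachP grid k i (j - 1)))
        (reachP grid k (i - 1) j) := by
  rw [reachP]; simp [hi, hj]

-- B side: a good memo stays good and the memoized recursion returns the memo-free value
theorem reachMemo_eq (grid : List (List Int)) (k : Int) :
    ∀ (N i j : Nat), i + j ≤ N →
      ∀ memo : PySem.Dict (Nat × Nat) (PySem.Set Int), GoodMemo grid k memo →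
        (reachMemo grid k i j memo).1 = reachP grid k i j ∧
          GoodMemo grid k (reachMemo grid k i j memo).2 := by
  intro N
  induction N using Nat.strong_induction_on with
  | _ N ih =>
  intro i j hij memo h
  rw [reachMemo]
  cases hmem : memo.get? (i, j) with
  | some s => exact ⟨h i j s hmem, h⟩
  | none =>
    simp only [hmem]
    by_cases hj : j = 0 <;> by_cases hi : i = 0
    · -- base cell
      subst hi; subst hj
      simp only [ne_eq, not_true_eq_false, if_false, and_self, if_true, ite_false, ite_true,
        not_false_eq_true, reduceIte]
      refine ⟨by rw [reachP]; simp, ?_⟩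
      intro a b s hs
      rw [PySem.Dict.get?_insert] at hs
      split at hs
      · rename_i heq
        obtain ⟨h1, h2⟩ := (Prod.mk.injEq a b 0 0).mp heq
        rw [h1, h2]
        rw [reachP]; simp at hs ⊢; exact hs.symm
      · exact h a b s hs
    · -- j = 0, i ≠ 0 : only the up call
      subst hj
      have hlt : i - 1 + 0 ≤ i + 0 - 1 := by omega
      obtain ⟨e1, g1⟩ := ih (i + 0 - 1) (by omega) (i - 1) 0 (by omega) memo h
      simp only [ne_eq, not_true_eq_false, ite_false, reduceIte, hi, if_false, and_false,
        not_false_eq_true, ite_true, false_and]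
      refine ⟨?_, ?_⟩
      · rw [reachP]; simp only [hi, and_false, false_and, ite_false, reduceIte, ne_eq,
          not_true_eq_false, not_false_eq_true, ite_true, e1]
      · intro a b s hs
        rw [PySem.Dict.get?_insert] at hs
        split at hs
        · rename_i heq
          obtain ⟨h1, h2⟩ := (Prod.mk.injEq a b i 0).mp heq
          rw [h1, h2]
          have : s = addModMul k (gridAt grid i 0) PySem.Set.empty
              ((reachMemo grid k (i - 1) 0 memo).1) := by
            simpa using hs.symm
          rw [this, e1]
          conv_rhs => rw [reachP]
          simp [hi]
        · exact g1 a b s hs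
    · -- j ≠ 0, i = 0 : only the left call
      subst hi
      obtain ⟨e1, g1⟩ := ih (0 + j - 1) (by omega) 0 (j - 1) (by omega) memo h
      simp only [ne_eq, hj, not_false_eq_true, ite_true, not_true_eq_false, ite_false,
        reduceIte, and_false, false_and, if_false]
      refine ⟨?_, ?_⟩
      · rw [reachP]; simp only [hj, and_false, false_and, ite_false, reduceIte, ne_eq,
          not_false_eq_true, ite_true, not_true_eq_false, e1]
      · intro a b s hs
        rw [PySem.Dict.get?_insert] at hs
        split at hs
        · rename_i heq
          obtain ⟨h1, h2⟩ := (Prod.mk.injEq a b 0 j).mp heq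
          rw [h1, h2]
          have : s = addModMul k (gridAt grid 0 j) PySem.Set.empty
              ((reachMemo grid k 0 (j - 1) memo).1) := by
            simpa using hs.symm
          rw [this, e1]
          conv_rhs => rw [reachP]
          simp [hj]
        · exact g1 a b s hs
    · -- inner cell : both calls
      obtain ⟨e1, g1⟩ := ih (i + j - 1) (by omega) i (j - 1) (by omega) memo h
      obtain ⟨e2, g2⟩ := ih (i + j - 1) (by omega) (i - 1) j (by omega)
        ((reachMemo grid k i (j - 1) memo).2) g1
      simp only [ne_eq, hj, hi, not_false_eq_true, ite_true, reduceIte, and_false, false_and,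
        if_false, and_self, ite_false]
      refine ⟨?_, ?_⟩
      · rw [reachP]; simp only [hi, hj, and_false, false_and, ite_false, reduceIte, ne_eq,
          not_false_eq_true, ite_true, e1, e2]
      · intro a b s hs
        rw [PySem.Dict.get?_insert] at hs
        split at hs
        · rename_i heq
          obtain ⟨h1, h2⟩ := (Prod.mk.injEq a b i j).mp heq
          rw [h1, h2]
          have : s = addModMul k (gridAt grid i j)
              (addModMul k (gridAt grid i j) PySem.Set.empty
                ((reachMemo grid k i (j - 1) memo).1))
              ((reachMemo grid k (i - 1) j (reachMemo grid k i (j - 1) memo).2).1) := by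
            simpa using hs.symm
          rw [this, e1, e2]
          conv_rhs => rw [reachP]
          simp [hi, hj]
        · exact g2 a b s hs

-- A side: the tables produced by the three loop phases, characterized pointwise
theorem phase1 (grid : List (List Int)) (k : Int) : ∀ a : Nat,
    (PySem.List.pyRange 1 ((a + 1 : Nat) : Int)).foldl
      (fun dp i =>
        upd2 dp i.toNat 0
          (addModMul k (gridAt grid i.toNat 0) (dp i.toNat 0) (dp (i.toNat - 1) 0)))
      (upd2 (fun _ _ => PySem.Set.empty) 0 0
        (PySem.Set.add ((fun _ _ => (PySem.Set.empty : PySem.Set Int)) 0 0)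
          (PySem.Int.mod (gridAt grid 0 0) k))) =
    fun i j => if j = 0 ∧ i < a + 1 then reachP grid k i j else PySem.Set.empty := by
  intro a
  induction a with
  | zero =>
    have h0 : PySem.List.pyRange 1 ((0 + 1 : Nat) : Int) = [] := by decide
    rw [h0, List.foldl_nil]
    funext i j
    simp only [upd2]
    by_cases hij : i = 0 ∧ j = 0
    · obtain ⟨rfl, rfl⟩ := hij
      simp [reachP]
    · have : ¬ (j = 0 ∧ i < 0 + 1) := by omega
      rw [if_neg this, if_neg hij]
  | succ a ih =>
    have hcast : ((a + 1 + 1 : Nat) : Int) = ((a + 1 : Nat) : Int) + 1 := by push_cast; ring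
    rw [hcast, PySem.List.pyRange_one_succ_right (by exact_mod_cast Nat.le_add_left 1 a),
      List.foldl_append, List.foldl_cons, List.foldl_nil, ih]
    funext i j
    simp only [upd2, Int.toNat_natCast]
    by_cases hij : i = a + 1 ∧ j = 0
    · obtain ⟨rfl, rfl⟩ := hij
      have h1 : ¬ (0 = 0 ∧ a + 1 < a + 1) := by omega
      have h2 : (0 = 0 ∧ a + 1 - 1 < a + 1) := by omega
      simp only [if_pos (And.intro rfl rfl), if_neg h1, if_pos h2]
      rw [reachP_pos_zero grid k (a + 1) (by omega)]
      simp [addModMul]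
    · have : (j = 0 ∧ i < a + 1 + 1) ↔ (j = 0 ∧ i < a + 1) := by
        constructor
        · rintro ⟨rfl, hlt⟩; exact ⟨rfl, by omega⟩
        · rintro ⟨rfl, hlt⟩; exact ⟨rfl, by omega⟩
      simp only [if_neg hij]
      exact if_congr this.symm rfl rfl

theorem phase2 (grid : List (List Int)) (k : Int) (mN : Nat) (hm : 1 ≤ mN) : ∀ b : Nat,
    (PySem.List.pyRange 1 ((b + 1 : Nat) : Int)).foldl
      (fun dp j =>
        upd2 dp 0 j.toNat
          (addModMul k (gridAt grid 0 j.toNat) (dp 0 j.toNat) (dp 0 (j.toNat - 1))))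
      (fun i j => if j = 0 ∧ i < mN then reachP grid k i j else PySem.Set.empty) =
    fun i j => if (j = 0 ∧ i < mN) ∨ (i = 0 ∧ j < b + 1) then reachP grid k i j
               else PySem.Set.empty := by
  intro b
  induction b with
  | zero =>
    have h0 : PySem.List.pyRange 1 ((0 + 1 : Nat) : Int) = [] := by decide
    rw [h0, List.foldl_nil]
    funext i j
    exact if_congr (by omega) rfl rfl
  | succ b ih =>
    have hcast : ((b + 1 + 1 : Nat) : Int) = ((b + 1 : Nat) : Int) + 1 := by push_cast; ring
    rw [hcast, PySem.List.pyRange_one_succ_right (by exact_mod_cast Nat.le_add_left 1 b),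
      List.foldl_append, List.foldl_cons, List.foldl_nil, ih]
    funext i j
    simp only [upd2, Int.toNat_natCast]
    by_cases hij : i = 0 ∧ j = b + 1
    · obtain ⟨rfl, rfl⟩ := hij
      rw [if_pos ⟨rfl, rfl⟩,
        if_neg (show ¬(b + 1 = 0 ∧ 0 < mN ∨ True ∧ b + 1 < b + 1) by simp only [true_and]; omega),
        if_pos (Or.inr ⟨trivial, by omega⟩ : (b + 1 - 1 = 0 ∧ 0 < mN ∨ True ∧ b + 1 - 1 < b + 1)),
        if_pos (Or.inr ⟨rfl, by omega⟩ : (b + 1 = 0 ∧ 0 < mN ∨ 0 = 0 ∧ b + 1 < b + 1 + 1)),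
        reachP_zero_pos grid k (b + 1) (by omega)]
    · rw [if_neg hij]
      exact if_congr (by omega) rfl rfl

-- coverage after the main phase has finished rows 1..a-1 and, in row a, columns 1..b-1
abbrev cov (mN nN a : Nat) (i j : Nat) : Prop :=
  (j = 0 ∧ i < mN) ∨ (i = 0 ∧ j < nN) ∨ (1 ≤ i ∧ i < a ∧ 1 ≤ j ∧ j < nN)

theorem phase3_inner (grid : List (List Int)) (k : Int) (mN nN a : Nat)
    (ha1 : 1 ≤ a) (ham : a < mN) (hn : 1 ≤ nN) : ∀ b : Nat, b + 1 ≤ nN →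
    (PySem.List.pyRange 1 ((b + 1 : Nat) : Int)).foldl
      (fun dp j =>
        upd2 dp a j.toNat
          (addModMul k (gridAt grid a j.toNat)
            (addModMul k (gridAt grid a j.toNat) (dp a j.toNat) (dp a (j.toNat - 1)))
            (dp (a - 1) j.toNat)))
      (fun i j => if cov mN nN a i j then reachP grid k i j else PySem.Set.empty) =
    fun i j => if cov mN nN a i j ∨ (i = a ∧ 1 ≤ j ∧ j < b + 1) then reachP grid k i j
               else PySem.Set.empty := by
  intro b
  induction b with
  | zero =>
    intro hb
    have h0 : PySem.List.pyRange 1 ((0 + 1 : Nat) : Int) = [] := by decide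
    rw [h0, List.foldl_nil]
    funext i j
    exact if_congr (by unfold cov; omega) rfl rfl
  | succ b ih =>
    intro hb
    have hcast : ((b + 1 + 1 : Nat) : Int) = ((b + 1 : Nat) : Int) + 1 := by push_cast; ring
    rw [hcast, PySem.List.pyRange_one_succ_right (by exact_mod_cast Nat.le_add_left 1 b),
      List.foldl_append, List.foldl_cons, List.foldl_nil, ih (by omega)]
    funext i j
    simp only [upd2, Int.toNat_natCast]
    by_cases hij : i = a ∧ j = b + 1
    · obtain ⟨rfl, rfl⟩ := hij
      rw [if_pos ⟨rfl, rfl⟩,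
        if_neg (show ¬(cov mN nN i i (b + 1) ∨ True ∧ 1 ≤ b + 1 ∧ b + 1 < b + 1) by
          unfold cov; simp only [true_and]; omega),
        if_pos (show cov mN nN i i (b + 1 - 1) ∨ True ∧ 1 ≤ b + 1 - 1 ∧ b + 1 - 1 < b + 1 by
          unfold cov; simp only [true_and]; omega),
        if_pos (show cov mN nN i (i - 1) (b + 1) ∨ i - 1 = i ∧ 1 ≤ b + 1 ∧ b + 1 < b + 1 by
          unfold cov; omega),
        if_pos (show cov mN nN i i (b + 1) ∨ i = i ∧ 1 ≤ b + 1 ∧ b + 1 < b + 1 + 1 by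
          unfold cov; omega),
        reachP_pos_pos grid k i (b + 1) (by omega) (by omega)]
    · rw [if_neg hij]
      exact if_congr (by unfold cov; omega) rfl rfl

theorem phase3 (grid : List (List Int)) (k : Int) (mN nN : Nat) (hn : 1 ≤ nN) :
    ∀ a : Nat, a + 1 ≤ mN →
    (PySem.List.pyRange 1 ((a + 1 : Nat) : Int)).foldl
      (fun dp i =>
        (PySem.List.pyRange 1 ((nN : Nat) : Int)).foldl
          (fun dp j =>
            upd2 dp i.toNat j.toNat
              (addModMul k (gridAt grid i.toNat j.toNat)
                (addModMul k (gridAt grid i.toNat j.toNat) (dp i.toNat j.toNat)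
                  (dp i.toNat (j.toNat - 1)))
                (dp (i.toNat - 1) j.toNat)))
          dp)
      (fun i j => if (j = 0 ∧ i < mN) ∨ (i = 0 ∧ j < nN) then reachP grid k i j
                  else PySem.Set.empty) =
    fun i j => if cov mN nN (a + 1) i j then reachP grid k i j else PySem.Set.empty := by
  intro a
  induction a with
  | zero =>
    intro ha
    have h0 : PySem.List.pyRange 1 ((0 + 1 : Nat) : Int) = [] := by decide
    rw [h0, List.foldl_nil]
    funext i j
    exact if_congr (by unfold cov; omega) rfl rfl
  | succ a ih =>
    intro ha
    have hcast : ((a + 1 + 1 : Nat) : Int) = ((a + 1 : Nat) : Int) + 1 := by push_cast; ring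
    rw [hcast, PySem.List.pyRange_one_succ_right (by exact_mod_cast Nat.le_add_left 1 a),
      List.foldl_append, List.foldl_cons, List.foldl_nil, ih (by omega)]
    simp only [Int.toNat_natCast]
    have hinner := phase3_inner grid k mN nN (a + 1) (by omega) (by omega) hn (nN - 1) (by omega)
    rw [Nat.sub_add_cancel hn] at hinner
    rw [hinner]
    funext i j
    exact if_congr (by unfold cov; omega) rfl rfl

-- ===== VERDICT (by name: the statement is the Claim_ definition above) =====
theorem path_mul_mod_spec : Claim_equal_path_mul_mod := by
  intro m n k grid _ hpre
  obtain ⟨hm, hn, hk, hlen, hrow⟩ := hpre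
  unfold Spec_path_mul_mod
  have hgoodempty : GoodMemo grid k PySem.Dict.empty := by
    intro a b s hs
    simp [PySem.Dict.get?, PySem.Dict.empty] at hs
  have hB := (reachMemo_eq grid k ((m - 1).toNat + (n - 1).toNat) (m - 1).toNat (n - 1).toNat
    le_rfl PySem.Dict.empty hgoodempty).1
  simp only [path_mul_mod_alt, path_mul_mod]
  rw [hB]
  have hm1 : m = ((m.toNat - 1 + 1 : Nat) : Int) := by omega
  have hn1 : n = ((n.toNat - 1 + 1 : Nat) : Int) := by omega
  rw [hm1, hn1]
  rw [phase1 grid k (m.toNat - 1)]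
  rw [phase2 grid k (m.toNat - 1 + 1) (by omega) (n.toNat - 1)]
  rw [phase3 grid k (m.toNat - 1 + 1) (n.toNat - 1 + 1) (by omega) (m.toNat - 1) (by omega)]
  have e1 : (((m.toNat - 1 + 1 : Nat) : Int) - 1).toNat = m.toNat - 1 := by omega
  have e2 : (((n.toNat - 1 + 1 : Nat) : Int) - 1).toNat = n.toNat - 1 := by omega
  rw [e1, e2]
  simp only []
  rw [if_pos (show cov (m.toNat - 1 + 1) (n.toNat - 1 + 1) (m.toNat - 1 + 1)
    (m.toNat - 1) (n.toNat - 1) by unfold cov; omega)]
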